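-- pv_equiv track=rewrite | github.com/JakeMate15/competitive-programming | codeForces/D_Find_the_Different_Ones.py | preprocesar
-- ===== SOURCE A (Python) =====
-- def preprocesar(a):
--     n = len(a)
--     diffIndex = [n] * n  # Inicializar con n para indicar que no hay índice diferente
--     lastSeen = {}
--
--     for i in range(n - 1, -1, -1):
--         if a[i] in lastSeen:
--             diffIndex[i] = lastSeen[a[i]]
--         lastSeen[a[i]] = i
--
--     return diffIndex
-- ===== SOURCE B (Python) =====
-- def preprocesar(a):
--     n = len(a)
--     positions = {}
--     for i, x in enumerate(a):
--         positions.setdefault(x, []).append(i)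
--     diffIndex = [n] * n
--     for idx in positions.values():
--         for p, q in zip(idx, idx[1:]):
--             diffIndex[p] = q
--     return diffIndex
-- ===== Notes on version B (the rewrite author's own statement) =====
-- stated objective: alternative
-- what changed: Replaces the single backward pass with a lastSeen dict by two forward passes: first group the indices of each value into per-value lists, then link each consecutive pair of occurrences; last occurrences keep the default n.
import Mathlib
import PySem

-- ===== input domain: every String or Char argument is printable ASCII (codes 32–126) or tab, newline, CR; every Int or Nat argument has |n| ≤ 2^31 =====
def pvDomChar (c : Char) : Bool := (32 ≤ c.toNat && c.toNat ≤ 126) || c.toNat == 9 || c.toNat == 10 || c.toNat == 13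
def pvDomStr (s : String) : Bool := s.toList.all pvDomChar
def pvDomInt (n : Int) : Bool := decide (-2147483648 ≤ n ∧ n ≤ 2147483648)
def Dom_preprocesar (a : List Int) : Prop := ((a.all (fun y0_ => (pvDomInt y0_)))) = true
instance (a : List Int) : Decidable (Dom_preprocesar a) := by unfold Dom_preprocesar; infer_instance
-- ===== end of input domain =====

-- B replaces A's backward dict pass by two forward passes (group indices per value, then link consecutive occurrences): a different decomposition, same O(n) cost.

-- ===== PORT A =====
-- literal transliteration of A: backward loop over range(n-1,-1,-1) with state (diffIndex, lastSeen)
def preprocesar (a : List Int) : List Int :=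
  let n : Int := PySem.List.len a
  let diffIndex : List Int := PySem.List.pyRepeat [n] n
  let res := (PySem.List.pyRange (n - 1) (-1) (-1)).foldl
    (fun (st : List Int × PySem.Dict Int Int) i =>
      let ai := PySem.List.pyGetD a i 0
      let st1 := if st.2.contains ai then PySem.List.pySetD st.1 i (st.2.getD ai 0) else st.1
      (st1, st.2.insert ai i))
    (diffIndex, PySem.Dict.empty)
  res.1

-- ===== PORT B =====
-- literal transliteration of Source B: positions.setdefault(x, []).append(i) is Dict.modify x [] (· ++ [i]);
-- zip(idx, idx[1:]) is idx.zip (slice idx 1); diffIndex[p] = q is pySetD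
def preprocesar_alt (a : List Int) : List Int :=
  let n : Int := PySem.List.len a
  let positions : PySem.Dict Int (List Int) :=
    (PySem.List.enumerate a 0).foldl
      (fun d p => d.modify p.2 [] (fun l => l ++ [p.1])) PySem.Dict.empty
  let diffIndex : List Int := PySem.List.pyRepeat [n] n
  positions.values.foldl
    (fun diff idx =>
      (idx.zip (PySem.List.slice idx (some 1) none)).foldl
        (fun acc pq => PySem.List.pySetD acc pq.1 pq.2) diff)
    diffIndex

-- ===== PRECONDITION & SPEC =====
def Spec_preprocesar (a : List Int) (out : List Int) : Prop := out = preprocesar_alt a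
instance (a : List Int) (out : List Int) : Decidable (Spec_preprocesar a out) := by unfold Spec_preprocesar; infer_instance

-- ===== CLAIM (what is proved, stated in full; the proofs are below) =====
def Claim_equal_preprocesar : Prop := ∀ (a : List Int), Dom_preprocesar a → Spec_preprocesar a (preprocesar a)

-- ===== LEMMAS AND PROOFS =====

-- B's per-index value: first j > i with a[j] = a[i], else n
def pvNext (a : List Int) (i : Int) : Int :=
  ((PySem.List.pyRange (i + 1) (a.length : Int) 1).find? (fun j =>
      PySem.List.pyGetD a j 0 == PySem.List.pyGetD a i 0)).getD (a.length : Int)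

-- loop invariant for A's backward fold: after processing indices ≥ k, diffIndex holds pvNext
-- at those positions and n elsewhere, and lastSeen.get? v is the first index ≥ k whose value is v
theorem pv_inv (a : List Int) (k : Nat) (hk : k ≤ a.length) (d : List Int) (ls : PySem.Dict Int Int)
    (hd : d = (PySem.List.pyRange 0 (a.length : Int) 1).map
        (fun j => if (k : Int) ≤ j then pvNext a j else (a.length : Int)))
    (hls : ∀ v, ls.get? v =
        (PySem.List.pyRange (k : Int) (a.length : Int) 1).find? (fun j => PySem.List.pyGetD a j 0 == v)) :
    (((PySem.List.pyRange ((k : Int) - 1) (-1) (-1)).foldl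
      (fun (st : List Int × PySem.Dict Int Int) i =>
        let ai := PySem.List.pyGetD a i 0
        let st1 := if st.2.contains ai then PySem.List.pySetD st.1 i (st.2.getD ai 0) else st.1
        (st1, st.2.insert ai i))
      (d, ls)).1) = (PySem.List.pyRange 0 (a.length : Int) 1).map (pvNext a) := by
  induction k generalizing d ls with
  | zero =>
      rw [PySem.List.pyRange_neg_one_eq_nil (by omega)]
      simp only [List.foldl_nil]
      rw [hd]
      apply List.map_congr_left
      intro j hj
      rw [PySem.List.mem_pyRange_one] at hj
      have h0 : ((0 : Nat) : Int) ≤ j := by exact_mod_cast hj.1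
      rw [if_pos h0]
  | succ k ih =>
      have hklen : k < a.length := by omega
      have hcast : ((k + 1 : Nat) : Int) - 1 = (k : Int) := by push_cast; ring
      rw [hcast, PySem.List.pyRange_neg_one_cons (by omega : (-1 : Int) < (k : Int)),
        List.foldl_cons]
      -- the value at index k
      have hrange : PySem.List.pyRange ((k : Nat) : Int) (a.length : Int) 1
          = ((k : Nat) : Int) :: PySem.List.pyRange (((k : Nat) : Int) + 1) (a.length : Int) 1 :=
        PySem.List.pyRange_one_cons (by omega)
      have hcast2 : (((k + 1 : Nat)) : Int) = ((k : Nat) : Int) + 1 := by push_cast; ring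
      rw [hcast2] at hls
      -- new lastSeen invariant (same in both branches)
      have hls' : ∀ v, ((ls.insert (PySem.List.pyGetD a ((k : Nat) : Int) 0) ((k : Nat) : Int)).get? v)
          = (PySem.List.pyRange ((k : Nat) : Int) (a.length : Int) 1).find?
              (fun j => PySem.List.pyGetD a j 0 == v) := by
        intro v
        rw [hrange, PySem.Dict.get?_insert, List.find?_cons]
        by_cases hv : v = PySem.List.pyGetD a ((k : Nat) : Int) 0
        · simp [hv]
        · have hb : (PySem.List.pyGetD a ((k : Nat) : Int) 0 == v) = false := by
            rw [beq_eq_false_iff_ne]; exact Ne.symm hv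
          rw [if_neg hv, hb, hls v]
      cases hfind : (PySem.List.pyRange (((k : Nat) : Int) + 1) (a.length : Int) 1).find?
          (fun j => PySem.List.pyGetD a j 0 == PySem.List.pyGetD a ((k : Nat) : Int) 0) with
      | some j =>
          have hcontains : ls.contains (PySem.List.pyGetD a ((k : Nat) : Int) 0) = true := by
            rw [PySem.Dict.contains_eq_isSome_get?, hls, hfind]; rfl
          have hgetD : ls.getD (PySem.List.pyGetD a ((k : Nat) : Int) 0) 0 = j := by
            rw [PySem.Dict.getD_eq_get?_getD, hls, hfind]; rfl
          have hnext : pvNext a ((k : Nat) : Int) = j := by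
            unfold pvNext; rw [hfind]; rfl
          refine ih (by omega) _ _ ?_ hls'
          simp only [hcontains, if_true, hgetD]
          subst hd
          rw [PySem.List.pySetD_natCast]
          apply List.ext_getElem
          · simp [PySem.List.length_pyRange_one]
          · intro p h1 h2
            rw [List.getElem_set]
            by_cases hkp : k = p
            · subst hkp
              rw [if_pos rfl, List.getElem_map, PySem.List.getElem_pyRange_one, zero_add,
                if_pos (by omega), hnext]
            · rw [if_neg hkp]
              rw [List.getElem_map, List.getElem_map, PySem.List.getElem_pyRange_one]
              split_ifs <;> first | rfl | omega
      | none =>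
          have hcontains : ls.contains (PySem.List.pyGetD a ((k : Nat) : Int) 0) = false := by
            rw [PySem.Dict.contains_eq_isSome_get?, hls, hfind]; rfl
          have hnext : pvNext a ((k : Nat) : Int) = (a.length : Int) := by
            unfold pvNext; rw [hfind]; rfl
          refine ih (by omega) _ _ ?_ hls'
          simp only [hcontains, Bool.false_eq_true, if_false]
          subst hd
          apply List.map_congr_left
          intro x hx
          rw [PySem.List.mem_pyRange_one] at hx
          by_cases hxk : x = ((k : Nat) : Int)
          · subst hxk
            rw [if_neg (by omega), if_pos (by omega), hnext]
          · split_ifs <;> first | rfl | omega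

theorem pvA_eq (a : List Int) :
    preprocesar a = (PySem.List.pyRange 0 (a.length : Int) 1).map (pvNext a) := by
  have hd0 : List.replicate a.length ((a.length : Int))
      = (PySem.List.pyRange 0 (a.length : Int) 1).map
          (fun j => if (a.length : Int) ≤ j then pvNext a j else (a.length : Int)) := by
    have hc : ∀ j ∈ PySem.List.pyRange 0 (a.length : Int) 1,
        (fun j => if (a.length : Int) ≤ j then pvNext a j else (a.length : Int)) j
          = (fun _ => (a.length : Int)) j := by
      intro j hj
      rw [PySem.List.mem_pyRange_one] at hj
      simp only [if_neg (by omega : ¬ (a.length : Int) ≤ j)]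
    rw [List.map_congr_left hc, List.map_const', PySem.List.length_pyRange_one]
    simp
  have hls0 : ∀ v, (PySem.Dict.empty : PySem.Dict Int Int).get? v
      = (PySem.List.pyRange (a.length : Int) (a.length : Int) 1).find?
          (fun j => PySem.List.pyGetD a j 0 == v) := by
    intro v
    rw [PySem.List.pyRange_one_eq_nil le_rfl]
    simp [PySem.Dict.get?_empty]
  have h := pv_inv a a.length le_rfl _ _ hd0 hls0
  simp only [preprocesar, PySem.List.len_eq, PySem.List.pyRepeat_singleton, Int.toNat_natCast]
  exact h

-- ===================== B-side lemmas =====================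

-- indices of value v in a, in increasing order
def pvOcc (a : List Int) (v : Int) : List Int :=
  (PySem.List.pyRange 0 (a.length : Int) 1).filter (fun j => PySem.List.pyGetD a j 0 == v)

-- B's inner loop over one occurrence list
def pvInner (d ys : List Int) : List Int :=
  (ys.zip ys.tail).foldl (fun acc q => PySem.List.pySetD acc q.1 q.2) d

theorem pv_find_head (l : List Int) (p : Int → Bool) : l.find? p = (l.filter p).head? := by
  induction l with
  | nil => rfl
  | cons a t ih =>
      by_cases h : p a
      · rw [List.find?_cons_of_pos h, List.filter_cons_of_pos h, List.head?_cons]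
      · rw [List.find?_cons_of_neg (by simp [h]), List.filter_cons_of_neg (by simp [h]), ih]

theorem pv_lookup_none (ps : List (Int × Int)) (x : Int) (h : x ∉ ps.map Prod.fst) :
    ps.lookup x = none := by
  induction ps with
  | nil => rfl
  | cons q t ih =>
      simp only [List.map_cons, List.mem_cons, not_or] at h
      have hb : (x == q.1) = false := by
        rw [beq_eq_false_iff_ne]; exact h.1
      show (match x == q.1 with | true => some q.2 | false => List.lookup x t) = none
      rw [hb, ih h.2]

theorem pv_map_fst_zip : ∀ (l1 l2 : List Int), (l1.zip l2).map Prod.fst = l1.take l2.length := by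
  intro l1
  induction l1 with
  | nil => intro l2; simp
  | cons x t ih =>
      intro l2
      cases l2 with
      | nil => simp
      | cons y u => simp [List.zip_cons_cons, ih u]

theorem pv_length_fold_set (ps : List (Int × Int)) (d : List Int) :
    (ps.foldl (fun acc q => PySem.List.pySetD acc q.1 q.2) d).length = d.length := by
  induction ps generalizing d with
  | nil => rfl
  | cons q t ih => rw [List.foldl_cons, ih, PySem.List.length_pySetD]

theorem pv_fold_set_lookup (ps : List (Int × Int)) (d : List Int)
    (hnd : (ps.map Prod.fst).Nodup) (hin : ∀ q ∈ ps, 0 ≤ q.1 ∧ q.1 < (d.length : Int))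
    (x : Int) (hx0 : 0 ≤ x) :
    PySem.List.pyGetD (ps.foldl (fun acc q => PySem.List.pySetD acc q.1 q.2) d) x 0
      = (ps.lookup x).getD (PySem.List.pyGetD d x 0) := by
  induction ps generalizing d with
  | nil => rfl
  | cons q t ih =>
      obtain ⟨hq0, hq1⟩ := hin q List.mem_cons_self
      obtain ⟨m, hm⟩ : ∃ m : Nat, q.1 = (m : Int) := ⟨q.1.toNat, by omega⟩
      have hmlt : m < d.length := by omega
      simp only [List.map_cons, List.nodup_cons] at hnd
      rw [List.foldl_cons,
        ih (PySem.List.pySetD d q.1 q.2) hnd.2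
          (fun r hr => by rw [PySem.List.length_pySetD]; exact hin r (List.mem_cons_of_mem _ hr))]
      have hset : PySem.List.pyGetD (PySem.List.pySetD d q.1 q.2) x 0
          = if x = q.1 then q.2 else PySem.List.pyGetD d x 0 := by
        by_cases hx2 : x < (d.length : Int)
        · have hxc : x = ((x.toNat : Nat) : Int) := by omega
          rw [hm, hxc, PySem.List.pyGetD_pySetD_natCast d m x.toNat q.2 0 hmlt]
          by_cases he : x.toNat = m
          · rw [if_pos he, if_pos (by omega)]
          · rw [if_neg he, if_neg (by omega)]
        · have h1 : PySem.List.pyGet? (PySem.List.pySetD d q.1 q.2) x = none := by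
            rw [PySem.List.pyGet?_eq_none_iff, PySem.List.length_pySetD]
            intro hr
            rcases hr with ⟨_, h2⟩
            omega
          have h2 : PySem.List.pyGet? d x = none := by
            rw [PySem.List.pyGet?_eq_none_iff]
            intro hr
            rcases hr with ⟨_, h2⟩
            omega
          rw [PySem.List.pyGetD_of_none _ _ _ h1, PySem.List.pyGetD_of_none _ _ _ h2, if_neg (by omega)]
      by_cases hx : x = q.1
      · have hnone : t.lookup x = none := pv_lookup_none t x (by rw [hx]; exact hnd.1)
        have hcons : ((q :: t).lookup x) = some q.2 := by
          show (match x == q.1 with | true => some q.2 | false => t.lookup x) = some q.2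
          rw [show (x == q.1) = true by simp [hx]]
        rw [hnone, hcons, Option.getD_some, Option.getD_none, hset, if_pos hx]

      · have hcons : ((q :: t).lookup x) = t.lookup x := by
          show (match x == q.1 with | true => some q.2 | false => t.lookup x) = t.lookup x
          rw [show (x == q.1) = false by simp [hx]]
        rw [hcons, hset, if_neg hx]

theorem pv_nodup_occ (a : List Int) (v : Int) : (pvOcc a v).Nodup :=
  List.Nodup.filter _ (PySem.List.nodup_pyRange_one 0 (a.length : Int))

theorem pv_mem_occ (a : List Int) (v : Int) (j : Int) (h : j ∈ pvOcc a v) :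
    0 ≤ j ∧ j < (a.length : Int) := by
  have := (List.mem_filter.mp h).1
  rwa [PySem.List.mem_pyRange_one] at this

theorem pv_occ_decomp (a : List Int) (p : Nat) (hp : p < a.length)
    (hv : PySem.List.pyGetD a (p : Int) 0 = v) :
    pvOcc a v = ((PySem.List.pyRange 0 (p : Int) 1).filter (fun j => PySem.List.pyGetD a j 0 == v))
      ++ (p : Int) :: ((PySem.List.pyRange ((p : Int) + 1) (a.length : Int) 1).filter
            (fun j => PySem.List.pyGetD a j 0 == v)) := by
  unfold pvOcc
  rw [PySem.List.pyRange_one_append 0 ((p : Int) + 1) (a.length : Int) (by omega) (by omega),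
    List.filter_append,
    PySem.List.pyRange_one_succ_right (by omega : (0 : Int) ≤ (p : Int)),
    List.filter_append]
  have hb : (PySem.List.pyGetD a (p : Int) 0 == v) = true := by simp [hv]
  rw [List.filter_cons, hb]
  simp

theorem pv_lookup_zip_self : ∀ (u : List Int) (x : Int) (rest : List Int),
    (u ++ x :: rest).Nodup →
    (((u ++ x :: rest).zip (u ++ x :: rest).tail).lookup x) = rest.head? := by
  intro u
  induction u with
  | nil =>
      intro x rest hnd
      cases rest with
      | nil => rfl
      | cons r0 r' =>
          show (match x == x with
            | true => some r0
            | false => ((r0 :: r').zip r').lookup x) = some r0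
          rw [show (x == x) = true by simp]
  | cons u0 u' ih =>
      intro x rest hnd
      rw [List.cons_append, List.nodup_cons] at hnd
      have hne : x ≠ u0 := by
        intro he
        exact hnd.1 (he ▸ List.mem_append_right _ List.mem_cons_self)
      obtain ⟨t0, t', ht⟩ : ∃ t0 t', u' ++ x :: rest = t0 :: t' := by
        cases hu : u' ++ x :: rest with
        | nil => exact absurd hu (List.append_ne_nil_of_right_ne_nil _ (by simp))
        | cons b c => exact ⟨b, c, rfl⟩
      show (((u0 :: (u' ++ x :: rest)).zip (u0 :: (u' ++ x :: rest)).tail).lookup x) = rest.head?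
      rw [ht, List.tail_cons, List.zip_cons_cons]
      show (match x == u0 with
        | true => some t0
        | false => ((t0 :: t').zip t').lookup x) = rest.head?
      rw [show (x == u0) = false by rw [beq_eq_false_iff_ne]; exact hne]
      have hih := ih x rest hnd.2
      rw [ht, List.tail_cons] at hih
      exact hih

-- effect of one inner pass at a matching position
theorem pv_inner_match (a : List Int) (v : Int) (d : List Int) (hd : d.length = a.length)
    (p : Nat) (hp : p < a.length) (hv : PySem.List.pyGetD a (p : Int) 0 = v) :
    PySem.List.pyGetD (pvInner d (pvOcc a v)) (p : Int) 0
      = ((PySem.List.pyRange ((p : Int) + 1) (a.length : Int) 1).find?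
            (fun j => PySem.List.pyGetD a j 0 == v)).getD (PySem.List.pyGetD d (p : Int) 0) := by
  have hocc := pv_occ_decomp a p hp hv
  have hnd : (((pvOcc a v).zip (pvOcc a v).tail).map Prod.fst).Nodup := by
    rw [pv_map_fst_zip]
    exact (List.take_sublist _ _).nodup (pv_nodup_occ a v)
  have hin : ∀ q ∈ (pvOcc a v).zip (pvOcc a v).tail, 0 ≤ q.1 ∧ q.1 < (d.length : Int) := by
    intro q hq
    have := pv_mem_occ a v q.1 (List.of_mem_zip hq).1
    rw [hd]
    exact this
  show PySem.List.pyGetD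
      (((pvOcc a v).zip (pvOcc a v).tail).foldl (fun acc q => PySem.List.pySetD acc q.1 q.2) d)
      (p : Int) 0 = _
  rw [pv_fold_set_lookup _ d hnd hin (p : Int) (by omega)]
  have hlz : ((pvOcc a v).zip (pvOcc a v).tail).lookup (p : Int)
      = ((PySem.List.pyRange ((p : Int) + 1) (a.length : Int) 1).filter
          (fun j => PySem.List.pyGetD a j 0 == v)).head? := by
    rw [hocc]
    exact pv_lookup_zip_self _ _ _ (hocc ▸ pv_nodup_occ a v)
  rw [hlz, pv_find_head]

-- an inner pass for a different value leaves the position unchanged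

theorem pv_fold_set_untouched (ps : List (Int × Int)) (p : Nat) (hpos : ∀ q ∈ ps, 0 ≤ q.1) :
    ∀ d : List Int, ps.lookup (p : Int) = none →
    PySem.List.pyGetD (ps.foldl (fun acc q => PySem.List.pySetD acc q.1 q.2) d) (p : Int) 0
      = PySem.List.pyGetD d (p : Int) 0 := by
  induction ps with
  | nil => intro d _; rfl
  | cons q t ih =>
      intro d hnone
      have hq0 : 0 ≤ q.1 := hpos q List.mem_cons_self
      have hpos' : ∀ r ∈ t, 0 ≤ r.1 := fun r hr => hpos r (List.mem_cons_of_mem _ hr)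
      have hq : ((p : Int) == q.1) = false := by
        cases hb : ((p : Int) == q.1) with
        | false => rfl
        | true =>
            rw [show ((q :: t).lookup (p : Int))
                = (match (p : Int) == q.1 with
                   | true => some q.2
                   | false => t.lookup (p : Int)) from rfl, hb] at hnone
            simp at hnone
      have hnone' : t.lookup (p : Int) = none := by
        rw [show ((q :: t).lookup (p : Int))
            = (match (p : Int) == q.1 with
               | true => some q.2
               | false => t.lookup (p : Int)) from rfl, hq] at hnone
        exact hnone
      rw [List.foldl_cons, ih hpos' (PySem.List.pySetD d q.1 q.2) hnone']
      have hne : (p : Int) ≠ q.1 := by simpa using hq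
      by_cases hq1 : q.1 < (d.length : Int)
      · obtain ⟨m, hm⟩ : ∃ m : Nat, q.1 = (m : Int) := ⟨q.1.toNat, by omega⟩
        rw [hm, PySem.List.pyGetD_pySetD_natCast d m p q.2 0 (by omega), if_neg (by omega)]
      · -- write beyond the end: pySetD is a no-op
        have hno : PySem.List.pySet? d q.1 q.2 = none := by
          rw [PySem.List.pySet?_eq_none_iff]
          intro hr
          rcases hr with ⟨h1, h2⟩
          omega
        show PySem.List.pyGetD ((PySem.List.pySet? d q.1 q.2).getD d) (p : Int) 0 = _
        rw [hno]
        rfl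

theorem pv_inner_other (a : List Int) (v : Int) (d : List Int)
    (p : Nat) (hv : PySem.List.pyGetD a (p : Int) 0 ≠ v) :
    PySem.List.pyGetD (pvInner d (pvOcc a v)) (p : Int) 0 = PySem.List.pyGetD d (p : Int) 0 := by
  have hnone : ((pvOcc a v).zip (pvOcc a v).tail).lookup (p : Int) = none := by
    apply pv_lookup_none
    intro hmem
    rw [pv_map_fst_zip] at hmem
    have hmem2 : (p : Int) ∈ pvOcc a v := List.mem_of_mem_take hmem
    have := (List.mem_filter.mp hmem2).2
    exact hv (by simpa using this)
  exact pv_fold_set_untouched _ p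
    (fun q hq => (pv_mem_occ a v q.1 (List.of_mem_zip hq).1).1) d hnone

theorem pv_length_inner (d ys : List Int) : (pvInner d ys).length = d.length :=
  pv_length_fold_set _ _

-- outer loop invariant: after processing values W, positions whose value is in W hold pvNext
theorem pv_outer (a : List Int) : ∀ (V W d : List Int), d.length = a.length →
    (∀ p : Nat, p < a.length →
      PySem.List.pyGetD d (p : Int) 0
        = if PySem.List.pyGetD a (p : Int) 0 ∈ W then pvNext a (p : Int) else (a.length : Int)) →
    (V.foldl (fun d v => pvInner d (pvOcc a v)) d).length = a.length ∧
    (∀ p : Nat, p < a.length →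
      PySem.List.pyGetD (V.foldl (fun d v => pvInner d (pvOcc a v)) d) (p : Int) 0
        = if PySem.List.pyGetD a (p : Int) 0 ∈ W ++ V then pvNext a (p : Int)
          else (a.length : Int)) := by
  intro V
  induction V with
  | nil =>
      intro W d hlen hinv
      refine ⟨by simpa using hlen, ?_⟩
      intro p hp
      simpa using hinv p hp
  | cons v t ih =>
      intro W d hlen hinv
      have hlen' : (pvInner d (pvOcc a v)).length = a.length := by
        rw [pv_length_inner, hlen]
      have hinv' : ∀ p : Nat, p < a.length →
          PySem.List.pyGetD (pvInner d (pvOcc a v)) (p : Int) 0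
            = if PySem.List.pyGetD a (p : Int) 0 ∈ W ++ [v] then pvNext a (p : Int)
              else (a.length : Int) := by
        intro p hp
        by_cases hpv : PySem.List.pyGetD a (p : Int) 0 = v
        · rw [pv_inner_match a v d hlen p hp hpv,
            if_pos (List.mem_append_right _ (by simp [hpv]))]
          have hnx : pvNext a (p : Int)
              = ((PySem.List.pyRange ((p : Int) + 1) (a.length : Int) 1).find?
                  (fun j => PySem.List.pyGetD a j 0 == v)).getD (a.length : Int) := by
            unfold pvNext
            rw [hpv]
          cases hf : (PySem.List.pyRange ((p : Int) + 1) (a.length : Int) 1).find?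
              (fun j => PySem.List.pyGetD a j 0 == v) with
          | some j => rw [hnx, hf, Option.getD_some, Option.getD_some]
          | none =>
              rw [hnx, hf, Option.getD_none, Option.getD_none, hinv p hp]
              split_ifs with hw
              · rw [hnx, hf, Option.getD_none]
              · rfl
        · rw [pv_inner_other a v d p hpv, hinv p hp]
          have hmem : (PySem.List.pyGetD a (p : Int) 0 ∈ W ++ [v])
              ↔ (PySem.List.pyGetD a (p : Int) 0 ∈ W) := by
            rw [List.mem_append, List.mem_singleton]
            exact ⟨fun h => h.resolve_right hpv, Or.inl⟩
          by_cases hw : PySem.List.pyGetD a (p : Int) 0 ∈ W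
          · rw [if_pos hw, if_pos (hmem.mpr hw)]
          · rw [if_neg hw, if_neg (fun hmm => hw (hmem.mp hmm))]
      obtain ⟨h1, h2⟩ := ih (W ++ [v]) (pvInner d (pvOcc a v)) hlen' hinv'
      constructor
      · rw [List.foldl_cons]
        exact h1
      · intro p hp
        rw [List.foldl_cons]
        rw [h2 p hp, show W ++ [v] ++ t = W ++ v :: t by simp]

-- the grouping pass: positions.getD v [] is the occurrence list of v
theorem pv_positions_getD (a : List Int) (v : Int) :
    ((PySem.List.enumerate a 0).foldl
      (fun d p => d.modify p.2 [] (fun l => l ++ [p.1])) PySem.Dict.empty).getD v []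
      = pvOcc a v := by
  have hswap : (PySem.List.enumerate a 0).foldl
      (fun d p => d.modify p.2 [] (fun l => l ++ [p.1])) (PySem.Dict.empty : PySem.Dict Int (List Int))
      = ((PySem.List.enumerate a 0).map (fun p => (p.2, p.1))).foldl
          (fun d q => d.modify q.1 [] (fun l => l ++ [q.2])) PySem.Dict.empty := by
    rw [List.foldl_map]
  rw [hswap, PySem.Dict.getD_foldl_modify_append, PySem.Dict.getD_empty, List.nil_append,
    List.filter_map, PySem.List.enumerate_eq_map_pyRange a 0, List.filter_map, List.map_map,
    List.map_map]
  unfold pvOcc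
  rw [PySem.List.len_eq]
  rw [show (((fun x : Int × Int => x.2) ∘ fun p : Int × Int => (p.2, p.1))
        ∘ fun j : Int => (j, PySem.List.pyGetD a j 0)) = (id : Int → Int) from rfl,
    List.map_id]
  rfl

theorem pvB_eq (a : List Int) :
    preprocesar_alt a = (PySem.List.pyRange 0 (a.length : Int) 1).map (pvNext a) := by
  simp only [preprocesar_alt, PySem.List.len_eq, PySem.List.pyRepeat_singleton,
    Int.toNat_natCast, PySem.List.slice_from_one]
  have hnd : ((PySem.List.enumerate a 0).foldl
      (fun d p => d.modify p.2 [] (fun l => l ++ [p.1]))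
      (PySem.Dict.empty : PySem.Dict Int (List Int))).keys.Nodup :=
    PySem.Dict.nodup_keys_foldl_modify_key _ (fun p : Int × Int => p.2) [] _ _
      (by rw [PySem.Dict.keys_empty]; exact List.nodup_nil)
  have hkeys : ((PySem.List.enumerate a 0).foldl
      (fun d p => d.modify p.2 [] (fun l => l ++ [p.1]))
      (PySem.Dict.empty : PySem.Dict Int (List Int))).keys = PySem.Set.ofList a := by
    rw [PySem.Dict.keys_foldl_modify_key, PySem.Dict.keys_empty, PySem.List.map_snd_enumerate]
    rfl
  have hvals : ((PySem.List.enumerate a 0).foldl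
      (fun d p => d.modify p.2 [] (fun l => l ++ [p.1]))
      (PySem.Dict.empty : PySem.Dict Int (List Int))).values
      = (PySem.Set.ofList a).map (fun v => pvOcc a v) := by
    rw [PySem.Dict.values_eq_map_keys _ hnd [], hkeys]
    exact List.map_congr_left (fun v _ => pv_positions_getD a v)
  rw [hvals, List.foldl_map]
  have hshape : (PySem.Set.ofList a).foldl
      (fun diff v => ((pvOcc a v).zip (pvOcc a v).tail).foldl
        (fun acc pq => PySem.List.pySetD acc pq.1 pq.2) diff)
      (List.replicate a.length (a.length : Int))
      = (PySem.Set.ofList a).foldl (fun d v => pvInner d (pvOcc a v))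
          (List.replicate a.length (a.length : Int)) := rfl
  rw [hshape]
  obtain ⟨hlenf, hptw⟩ := pv_outer a (PySem.Set.ofList a) []
    (List.replicate a.length (a.length : Int)) (by simp)
    (fun p hp => by
      rw [if_neg (by simp), PySem.List.pyGetD_natCast, List.getD_eq_getElem _ _ (by simpa using hp),
        List.getElem_replicate])
  apply List.ext_getElem
  · rw [hlenf, List.length_map, PySem.List.length_pyRange_one]
    omega
  · intro p h1 h2
    have hp : p < a.length := by rw [hlenf] at h1; exact h1
    have hmem : PySem.List.pyGetD a (p : Int) 0 ∈ ([] : List Int) ++ PySem.Set.ofList a := by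
      rw [List.nil_append, PySem.Set.mem_ofList]
      rw [PySem.List.pyGetD_natCast, List.getD_eq_getElem _ _ hp]
      exact List.getElem_mem hp
    have := hptw p hp
    rw [if_pos hmem, PySem.List.pyGetD_natCast, List.getD_eq_getElem _ _ h1] at this
    rw [this, List.getElem_map, PySem.List.getElem_pyRange_one, zero_add]

theorem preprocesar_spec : Claim_equal_preprocesar := by
  intro a _
  show preprocesar a = preprocesar_alt a
  rw [pvA_eq, pvB_eq]
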